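-- pv_equiv track=rewrite | github.com/patty-chow/cs-313e | WordSearch.py | diagBLR
-- ===== SOURCE A (Python) =====
-- def diagBLR(grid,word):
--   #Starts to the right of the top right corner at E
--   # and continues down all the way to T
--   cord = tuple()
--   for i in range(0, len(grid)):
--     diagBLRStr = ""
--     x = i
--     y = 0
--     while (len(grid) - 1 >= x >= 0):
--       diagBLRStr = diagBLRStr + grid[x][y]
--       x += 1
--       y += 1
--
--
--     if diagBLRStr.find(word) != -1:
--       x = i + 1 + diagBLRStr.find(word)
--       y = diagBLRStr.find(word) + 1
--       cord = (x,y)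
--       break
--
--   return cord
-- ===== SOURCE B (Python) =====
-- def _rk_find(d, w):
--     # Rabin-Karp: first index of list w in list d, or None.
--     # Exact Python ints (no modulus), so the hash filter never overflows;
--     # a full comparison on each hash hit makes false positives harmless.
--     L, m = len(d), len(w)
--     if m > L:
--         return None
--     K = 1000003
--     hw = 0
--     for c in w:
--         hw = hw * K + ord(c)
--     h = 0
--     for c in d[:m]:
--         h = h * K + ord(c)
--     top = K ** (m - 1) if m > 0 else 0
--     for p in range(L - m + 1):
--         if h == hw and d[p:p + m] == w:
--             return p
--         if p < L - m:
--             h = (h - ord(d[p]) * top) * K + ord(d[p + m])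
--     return None
--
--
-- def diagBLR(grid, word):
--     n = len(grid)
--     w = list(word)
--     for i in range(n):
--         d = [grid[i + j][j] for j in range(n - i)]
--         p = _rk_find(d, w)
--         if p is not None:
--             return (i + 1 + p, p + 1)
--     return ()
-- ===== Notes on version B (the rewrite author's own statement) =====
-- stated objective: alternative
-- what changed: B replaces quadratic string concatenation plus str.find per diagonal with a Rabin-Karp scan: a rolling polynomial hash of the current window is compared to the word's hash and a full comparison runs only on hash hits.
import Mathlib
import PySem

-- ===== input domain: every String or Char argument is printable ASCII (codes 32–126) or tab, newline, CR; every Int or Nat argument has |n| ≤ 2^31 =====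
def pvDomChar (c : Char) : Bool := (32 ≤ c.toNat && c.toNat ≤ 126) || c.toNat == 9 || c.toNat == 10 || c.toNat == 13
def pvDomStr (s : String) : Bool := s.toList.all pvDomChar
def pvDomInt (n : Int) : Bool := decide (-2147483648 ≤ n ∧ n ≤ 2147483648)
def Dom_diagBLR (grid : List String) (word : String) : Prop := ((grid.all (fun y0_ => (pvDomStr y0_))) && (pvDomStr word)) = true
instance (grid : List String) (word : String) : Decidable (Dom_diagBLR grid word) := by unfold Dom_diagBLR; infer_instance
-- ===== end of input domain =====

-- B replaces string concatenation + str.find per diagonal with a Rabin-Karp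
-- rolling-hash scan (full comparison only on hash hits) (objective: alternative).

-- grid[x][y] for Nat indices; exact where Python does not raise (Pre_ admits exactly those accesses)
def chAt (grid : List String) (x y : Nat) : Char := (grid.getD x "").toList.getD y ' '

-- ===== PORT A =====
-- A's while loop: builds the diagonal starting at row x, column y (chars grid[x][y], x,y stepping +1)
def diagOf (grid : List String) (n x y : Nat) : List Char :=
  if _h : x < n then chAt grid x y :: diagOf grid n (x + 1) (y + 1) else []
  termination_by n - x

-- A's for loop over i with the early break on the first diagonal whose find(word) ≠ -1
def aLoop (grid : List String) (w : List Char) (n i : Nat) : List Int :=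
  if _h : i < n then
    let f := PySem.Chars.find (diagOf grid n i 0) w
    if f ≠ -1 then [(i : Int) + 1 + f, f + 1] else aLoop grid w n (i + 1)
  else []
  termination_by n - i

def diagBLR (grid : List String) (word : String) : List Int :=
  aLoop grid word.toList grid.length 0

-- ===== PORT B =====
-- B's hash accumulation: h = h*K + ord(c) over a char list (K = 1000003, exact ints)
def hstep (a : Int) (c : Char) : Int := a * 1000003 + (c.toNat : Int)
def hashL (l : List Char) : Int := l.foldl hstep 0

-- B's for loop over offsets p (cnt remaining): hash filter, full compare on hit, then roll
def rkLoop (d w : List Char) (hw top : Int) : Nat → Nat → Int → Option Nat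
  | _, 0, _ => none
  | p, cnt + 1, h =>
    if h == hw && ((d.drop p).take w.length == w) then some p
    else
      rkLoop d w hw top (p + 1) cnt
        (if p < d.length - w.length then
          (h - ((d.getD p ' ').toNat : Int) * top) * 1000003 + ((d.getD (p + w.length) ' ').toNat : Int)
        else h)

-- B's _rk_find: first index of w in d via Rabin-Karp, none if absent
def rkFind (d w : List Char) : Option Nat :=
  if w.length > d.length then none
  else
    rkLoop d w (hashL w) (if 0 < w.length then (1000003 : Int) ^ (w.length - 1) else 0)
      0 (d.length - w.length + 1) (hashL (d.take w.length))

-- B's outer for loop over diagonals i: build the diagonal char list, then Rabin-Karp search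
def bLoop (grid : List String) (w : List Char) (n i : Nat) : List Int :=
  if _h : i < n then
    let d := (List.range (n - i)).map (fun j => chAt grid (i + j) j)
    match rkFind d w with
    | some p => [(i : Int) + 1 + (p : Int), (p : Int) + 1]
    | none => bLoop grid w n (i + 1)
  else []
  termination_by n - i

def diagBLR_alt (grid : List String) (word : String) : List Int :=
  bLoop grid word.toList grid.length 0

-- ===== PRECONDITION & SPEC =====
-- Pre_ excludes exactly the inputs where A raises IndexError: while building the very first
-- (longest) diagonal A reads grid[j][j] for every j, so every row j must be longer than j.
def Pre_diagBLR (grid : List String) (_word : String) : Prop :=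
  ∀ j, j < grid.length → j < (grid.getD j "").toList.length
instance (grid : List String) (word : String) : Decidable (Pre_diagBLR grid word) := by
  unfold Pre_diagBLR; infer_instance

def pvWitness_diagBLR : List String × String := (["ab", "cd"], "d")

def Spec_diagBLR (grid : List String) (word : String) (out : List Int) : Prop := out = diagBLR_alt grid word
instance (grid : List String) (word : String) (out : List Int) : Decidable (Spec_diagBLR grid word out) := by unfold Spec_diagBLR; infer_instance

-- ===== CLAIM (what is proved, stated in full; the proofs are below) =====
def Claim_equal_diagBLR : Prop := ∀ (grid : List String) (word : String), Dom_diagBLR grid word → Pre_diagBLR grid word → Spec_diagBLR grid word (diagBLR grid word)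

-- ===== LEMMAS AND PROOFS =====

theorem diagOf_eq_map (grid : List String) (n x y : Nat) :
    diagOf grid n x y = (List.range (n - x)).map (fun j => chAt grid (x + j) (y + j)) := by
  fun_induction diagOf with
  | case1 x y h ih =>
    rw [show n - x = (n - (x + 1)) + 1 by omega, List.range_succ_eq_map]
    simp only [List.map_cons, List.map_map, Nat.add_zero, ih]
    congr 1
    apply List.map_congr_left
    intro j _
    simp only [Function.comp_apply]
    congr 1 <;> omega
  | case2 x y h =>
    rw [show n - x = 0 by omega]
    simp

theorem foldl_hstep (l : List Char) (a : Int) :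
    l.foldl hstep a = a * 1000003 ^ l.length + l.foldl hstep 0 := by
  induction l generalizing a with
  | nil => simp
  | cons c t ih =>
    simp only [List.foldl_cons, List.length_cons]
    rw [ih (hstep a c), ih (hstep 0 c)]
    simp only [hstep]
    ring

theorem hashL_cons (c : Char) (t : List Char) :
    hashL (c :: t) = (c.toNat : Int) * 1000003 ^ t.length + hashL t := by
  simp only [hashL, List.foldl_cons]
  rw [foldl_hstep t (hstep 0 c)]
  simp [hstep]

theorem hashL_append (t : List Char) (c : Char) :
    hashL (t ++ [c]) = hashL t * 1000003 + (c.toNat : Int) := by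
  simp [hashL, List.foldl_append, hstep]

-- the rolling-hash update is exact
theorem roll (d : List Char) (m p : Nat) (hm : 1 ≤ m) (hpm : p + m < d.length) :
    (hashL ((d.drop p).take m) - ((d.getD p ' ').toNat : Int) * 1000003 ^ (m - 1)) * 1000003
      + ((d.getD (p + m) ' ').toNat : Int)
      = hashL ((d.drop (p + 1)).take m) := by
  obtain ⟨m', rfl⟩ : ∃ m', m = m' + 1 := ⟨m - 1, by omega⟩
  have hp : p < d.length := by omega
  have hpm' : p + (m' + 1) < d.length := hpm
  have htlen : ((d.drop (p + 1)).take m').length = m' := by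
    simp; omega
  have hw1 : (d.drop p).take (m' + 1) = d[p] :: (d.drop (p + 1)).take m' := by
    rw [List.drop_eq_getElem_cons hp, List.take_succ_cons]
  have hw2 : (d.drop (p + 1)).take (m' + 1) = (d.drop (p + 1)).take m' ++ [d[p + (m' + 1)]] := by
    rw [List.take_add_one]
    congr 1
    have hg : (d.drop (p + 1))[m']? = d[p + 1 + m']? := by
      simp [List.getElem?_drop]
    rw [hg, show p + 1 + m' = p + (m' + 1) by omega]
    simp [List.getElem?_eq_getElem hpm']
  rw [hw1, hw2, hashL_cons, hashL_append, htlen,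
    List.getD_eq_getElem d ' ' hp, List.getD_eq_getElem d ' ' hpm']
  simp only [Nat.add_sub_cancel]
  ring

theorem branch_false (d w : List Char) (p : Nat) (h hw : Int)
    (hnp : ¬ w <+: d.drop p) :
    (h == hw && ((d.drop p).take w.length == w)) = false := by
  have : ¬ ((d.drop p).take w.length = w) := by
    intro he
    exact hnp (he ▸ List.take_prefix _ _)
  simp [this]

theorem rkLoop_none (d w : List Char) (hw top : Int)
    (hno : ∀ q, ¬ w <+: d.drop q) :
    ∀ cnt p h, rkLoop d w hw top p cnt h = none := by
  intro cnt
  induction cnt with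
  | zero => intro p h; rfl
  | succ cnt ih =>
    intro p h
    rw [rkLoop, branch_false d w p h hw (hno p), if_neg (by simp)]
    exact ih _ _

theorem rkLoop_some (d w : List Char) (top : Int) (f : Nat)
    (hyes : w <+: d.drop f)
    (hno : ∀ q, q < f → ¬ w <+: d.drop q)
    (htop : w ≠ [] → top = (1000003 : Int) ^ (w.length - 1)) :
    ∀ cnt p h, p ≤ f → f < p + cnt → h = hashL ((d.drop p).take w.length) →
      rkLoop d w (hashL w) top p cnt h = some f := by
  have hflen : w.length ≤ d.length - f := by
    have := hyes.length_le
    simpa using this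
  intro cnt
  induction cnt with
  | zero => intro p h h1 h2; omega
  | succ cnt ih =>
    intro p h h1 h2 hinv
    rw [rkLoop]
    by_cases hpf : p = f
    · subst hpf
      have htake : (d.drop p).take w.length = w :=
        (List.prefix_iff_eq_take.mp hyes).symm
      rw [hinv, htake]
      simp
    · have hpltf : p < f := by omega
      have hnp := hno p hpltf
      have hne : w ≠ [] := by
        intro hwnil; subst hwnil
        exact hnp (List.nil_prefix)
      have hm1 : 1 ≤ w.length := List.length_pos_iff.mpr hne
      have hfL : f + w.length ≤ d.length := by omega
      have hguard : p < d.length - w.length := by omega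
      rw [branch_false d w p h (hashL w) hnp, if_neg (by simp)]
      apply ih (p + 1) _ (by omega) (by omega)
      rw [if_pos hguard, hinv, htop hne]
      exact roll d w.length p hm1 (by omega)

theorem rkFind_of_neg (d w : List Char) (hneg : PySem.Chars.find d w = -1) :
    rkFind d w = none := by
  unfold rkFind
  split
  · rfl
  · apply rkLoop_none
    intro q hq
    exact (PySem.Chars.find_eq_neg_one_iff d w).mp hneg
      (List.infix_iff_prefix_suffix.mpr ⟨_, hq, List.drop_suffix _ _⟩)

theorem rkFind_of_nonneg (d w : List Char) (h0 : 0 ≤ PySem.Chars.find d w) :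
    rkFind d w = some (PySem.Chars.find d w).toNat := by
  have hspec := PySem.Chars.find_spec (s := d) (sub := w) h0
  have hfle := PySem.Chars.find_le_length d w
  set f := (PySem.Chars.find d w).toNat with hf
  have hwle : w.length ≤ d.length - f := by
    have := hspec.1.length_le
    simpa using this
  have hfled : f ≤ d.length := by omega
  have hmle : w.length ≤ d.length := by omega
  unfold rkFind
  rw [if_neg (by omega)]
  apply rkLoop_some d w _ f hspec.1 hspec.2
  · intro hne
    rw [if_pos (List.length_pos_iff.mpr hne)]
  · omega
  · have hwpos : w.length ≤ d.length - f := hwle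
    omega
  · simp

theorem loops_eq_aux (grid : List String) (w : List Char) (n : Nat) :
    ∀ k i, n - i ≤ k → aLoop grid w n i = bLoop grid w n i := by
  intro k
  induction k with
  | zero =>
    intro i h
    rw [aLoop, bLoop, dif_neg (by omega), dif_neg (by omega)]
  | succ k ih =>
    intro i h
    by_cases hi : i < n
    · rw [aLoop, bLoop, dif_pos hi, dif_pos hi]
      simp only []
      have hmap : (List.range (n - i)).map (fun j => chAt grid (i + j) j)
          = diagOf grid n i 0 := by
        rw [diagOf_eq_map grid n i 0]
        apply List.map_congr_left
        intro j _
        simp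
      rw [hmap]
      by_cases hneg : PySem.Chars.find (diagOf grid n i 0) w = -1
      · rw [rkFind_of_neg _ _ hneg]
        simp only [hneg, ne_eq, not_true_eq_false, if_false]
        exact ih (i + 1) (by omega)
      · have h0 : 0 ≤ PySem.Chars.find (diagOf grid n i 0) w := by
          have := PySem.Chars.neg_one_le_find (diagOf grid n i 0) w
          omega
        rw [rkFind_of_nonneg _ _ h0]
        rw [if_pos (by omega)]
        have hfeq : PySem.Chars.find (diagOf grid n i 0) w
            = ((PySem.Chars.find (diagOf grid n i 0) w).toNat : Int) :=
          (Int.toNat_of_nonneg h0).symm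
        rw [hfeq]
        simp
    · rw [aLoop, bLoop, dif_neg hi, dif_neg hi]

theorem loops_eq (grid : List String) (w : List Char) (n : Nat) :
    ∀ i, aLoop grid w n i = bLoop grid w n i :=
  fun i => loops_eq_aux grid w n (n - i) i le_rfl

-- ===== VERDICT (by name: the statement is the Claim_ definition above) =====
theorem diagBLR_spec : Claim_equal_diagBLR := by
  intro grid word _ _
  unfold Spec_diagBLR diagBLR diagBLR_alt
  exact loops_eq grid word.toList grid.length 0
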